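-- pv_equiv track=rewrite | github.com/qsdrqs/CRUST-bench | src/utils/compile_rust_utils.py | create_error_blocks
-- ===== SOURCE A (Python) =====
-- def create_error_blocks(std_err):
--     blocks = []
--     flag_error = False
--     for x in std_err.split("\n"):
--         if x.startswith("error"):
--             flag_error = True
--             blocks.append(x)
--         elif x.startswith("warning"):
--             flag_error = False
--         else:
--             if flag_error:
--                 blocks.append(x)
--     return "\n".join(blocks)
-- ===== SOURCE B (Python) =====
-- def create_error_blocks(std_err):
--     # Segment the lines into header-delimited sections, then keep error sections.
--     sections = [[]]
--     for line in std_err.split("\n"):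
--         if line.startswith("error") or line.startswith("warning"):
--             sections.append([line])
--         else:
--             sections[-1].append(line)
--     error_lines = [l for sec in sections
--                    if sec and sec[0].startswith("error")
--                    for l in sec]
--     return "\n".join(error_lines)
-- ===== Notes on version B (the rewrite author's own statement) =====
-- stated objective: alternative
-- what changed: Replaces the running error-flag scan with a segment-then-filter pipeline: lines are partitioned into header-delimited sections, then the sections whose first line is an error header are flattened and joined.
import Mathlib
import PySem

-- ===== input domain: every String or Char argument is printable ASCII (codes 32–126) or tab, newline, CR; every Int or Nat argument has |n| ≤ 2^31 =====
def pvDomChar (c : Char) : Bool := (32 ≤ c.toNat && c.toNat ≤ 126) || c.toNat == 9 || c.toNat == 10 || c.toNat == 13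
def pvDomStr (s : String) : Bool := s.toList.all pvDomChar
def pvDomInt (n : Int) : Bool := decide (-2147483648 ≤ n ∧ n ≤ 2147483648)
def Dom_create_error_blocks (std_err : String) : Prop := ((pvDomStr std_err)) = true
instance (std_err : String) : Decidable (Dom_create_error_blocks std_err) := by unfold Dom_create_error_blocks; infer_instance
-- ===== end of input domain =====

-- B replaces A's running error-flag scan by a segment-then-filter pipeline (same cost, different decomposition).


-- ===== PORT A =====
def pvErr : List Char := "error".toList
def pvWarn : List Char := "warning".toList

def pvAStep (st : List (List Char) × Bool) (x : List Char) : List (List Char) × Bool :=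
  if PySem.Chars.startswith x pvErr then (st.1 ++ [x], true)
  else if PySem.Chars.startswith x pvWarn then (st.1, false)
  else if st.2 then (st.1 ++ [x], st.2) else st

def create_error_blocks (std_err : String) : String :=
  String.mk (PySem.Chars.join "\n".toList
    (((PySem.Chars.splitOn std_err.toList "\n".toList).foldl pvAStep ([], false)).1))

-- ===== PORT B =====
def pvIsErrSec (sec : List (List Char)) : Bool :=
  match sec with
  | [] => false
  | h :: _ => PySem.Chars.startswith h pvErr

-- sections[-1].append(line)
def pvPushLast : List (List (List Char)) → List Char → List (List (List Char))
  | [], line => [[line]]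
  | [s], line => [s ++ [line]]
  | s :: t :: rest, line => s :: pvPushLast (t :: rest) line

def pvSecStep (secs : List (List (List Char))) (line : List Char) : List (List (List Char)) :=
  if PySem.Chars.startswith line pvErr || PySem.Chars.startswith line pvWarn
  then secs ++ [[line]]
  else pvPushLast secs line

def create_error_blocks_alt (std_err : String) : String :=
  String.mk (PySem.Chars.join "\n".toList
    (((((PySem.Chars.splitOn std_err.toList "\n".toList).foldl pvSecStep [[]])).filter pvIsErrSec).flatten))

-- ===== PRECONDITION & SPEC =====
def Spec_create_error_blocks (std_err : String) (out : String) : Prop := out = create_error_blocks_alt std_err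
instance (std_err : String) (out : String) : Decidable (Spec_create_error_blocks std_err out) := by unfold Spec_create_error_blocks; infer_instance

-- ===== CLAIM (what is proved, stated in full; the proofs are below) =====
def Claim_equal_create_error_blocks : Prop := ∀ (std_err : String), Dom_create_error_blocks std_err → Spec_create_error_blocks std_err (create_error_blocks std_err)

-- ===== LEMMAS AND PROOFS =====

-- what A appends to `blocks` while scanning `ls` with the flag currently `flag`
def pvArun : Bool → List (List Char) → List (List Char)
  | _, [] => []
  | flag, x :: ls =>
    if PySem.Chars.startswith x pvErr then x :: pvArun true ls
    else if PySem.Chars.startswith x pvWarn then pvArun false ls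
    else (if flag then [x] else []) ++ pvArun flag ls

def pvSel (secs : List (List (List Char))) : List (List Char) := (secs.filter pvIsErrSec).flatten

def pvSel1 (cur : List (List Char)) : List (List Char) := if pvIsErrSec cur then cur else []

lemma pvAStep_fold : ∀ (ls : List (List Char)) (blocks : List (List Char)) (flag : Bool),
    (List.foldl pvAStep (blocks, flag) ls).1 = blocks ++ pvArun flag ls := by
  intro ls
  induction ls with
  | nil => intro blocks flag; simp [pvArun]
  | cons x ls ih =>
    intro blocks flag
    by_cases he : PySem.Chars.startswith x pvErr
    · simp [pvAStep, pvArun, he, ih]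
    · by_cases hw : PySem.Chars.startswith x pvWarn
      · simp [pvAStep, pvArun, he, hw, ih]
      · cases flag <;> simp [pvAStep, pvArun, he, hw, ih]

lemma pvPushLast_cons (s : List (List Char)) (rest : List (List (List Char))) (line : List Char)
    (h : rest ≠ []) : pvPushLast (s :: rest) line = s :: pvPushLast rest line := by
  cases rest with
  | nil => exact absurd rfl h
  | cons t r => rfl

lemma pvPushLast_append : ∀ (done : List (List (List Char))) (cur : List (List Char)) (line : List Char),
    pvPushLast (done ++ [cur]) line = done ++ [cur ++ [line]] := by
  intro done
  induction done with
  | nil => intro cur line; rfl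
  | cons d done ih =>
    intro cur line
    rw [List.cons_append, pvPushLast_cons d (done ++ [cur]) line (by simp), ih]
    rfl

lemma pvSel_append_single (done : List (List (List Char))) (cur : List (List Char)) :
    pvSel (done ++ [cur]) = pvSel done ++ pvSel1 cur := by
  simp only [pvSel, pvSel1, List.filter_append]
  cases h : pvIsErrSec cur <;> simp [List.filter, h]

lemma pvSecStep_fold : ∀ (ls : List (List Char)) (done : List (List (List Char))) (cur : List (List Char)),
    pvSel (List.foldl pvSecStep (done ++ [cur]) ls) = pvSel done ++ pvSel1 cur ++ pvArun (pvIsErrSec cur) ls := by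
  intro ls
  induction ls with
  | nil => intro done cur; simp [pvArun, pvSel_append_single]
  | cons x ls ih =>
    intro done cur
    by_cases he : PySem.Chars.startswith x pvErr
    · have hx : pvIsErrSec [x] = true := by simp [pvIsErrSec, he]
      have : pvSecStep (done ++ [cur]) x = (done ++ [cur]) ++ [[x]] := by
        simp [pvSecStep, he]
      rw [List.foldl_cons, this, ih (done ++ [cur]) [x], pvSel_append_single, hx]
      simp [pvArun, he, pvSel1, hx]
    · by_cases hw : PySem.Chars.startswith x pvWarn
      · have hx : pvIsErrSec [x] = false := by simp [pvIsErrSec, he]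
        have : pvSecStep (done ++ [cur]) x = (done ++ [cur]) ++ [[x]] := by
          simp [pvSecStep, hw]
        rw [List.foldl_cons, this, ih (done ++ [cur]) [x], pvSel_append_single, hx]
        simp [pvArun, he, hw, pvSel1, hx]
      · have hstep : pvSecStep (done ++ [cur]) x = done ++ [cur ++ [x]] := by
          simp [pvSecStep, he, hw, pvPushLast_append]
        rw [List.foldl_cons, hstep, ih done (cur ++ [x])]
        cases cur with
        | nil =>
          simp [pvArun, he, hw, pvSel1, pvIsErrSec]
        | cons h t =>
          have hh : pvIsErrSec (h :: (t ++ [x])) = pvIsErrSec (h :: t) := by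
            simp [pvIsErrSec]
          cases hf : pvIsErrSec (h :: t) <;>
            simp [pvArun, he, hw, pvSel1, hh, hf]

-- ===== VERDICT (by name: the statement is the Claim_ definition above) =====
theorem create_error_blocks_spec : Claim_equal_create_error_blocks := by
  intro std_err _
  unfold Spec_create_error_blocks create_error_blocks create_error_blocks_alt
  have hA := pvAStep_fold (PySem.Chars.splitOn std_err.toList "\n".toList) [] false
  have hB := pvSecStep_fold (PySem.Chars.splitOn std_err.toList "\n".toList) [] []
  simp only [List.nil_append] at hA hB
  rw [hA, show ((List.foldl pvSecStep [[]] (PySem.Chars.splitOn std_err.toList "\n".toList)).filter pvIsErrSec).flatten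
      = pvSel (List.foldl pvSecStep [[]] (PySem.Chars.splitOn std_err.toList "\n".toList)) from rfl, hB]
  simp [pvSel, pvSel1, pvIsErrSec]
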